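-- pv_equiv track=rewrite | github.com/myrtepacia/Algorithms | server.py | scytale_cipher_crypto
-- ===== SOURCE A (Python) =====
-- import math
--
-- def scytale_cipher_crypto(text, key, operation, steps, details):
--     steps.append(f"=== SCYTALE CIPHER {operation.upper()} ===")
--     steps.append(f"Input text: '{text}'")
--
--     try:
--         diameter = int(key) if key else 3
--     except:
--         diameter = 3
--
--     steps.append(f"Cylinder diameter: {diameter}")
--     steps.append("")
--
--     if operation == 'encrypt':
--         steps.append("Wrapping text around cylinder and reading horizontally:")
--         result = ""
--         for i in range(diameter):
--             column = text[i::diameter]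
--             result += column
--             steps.append(f"  Column {i+1}: '{column}'")
--         steps.append(f"Final result: '{result}'")
--
--     else:
--         steps.append("Reading horizontal stripes and unwrapping from cylinder:")
--         rows = math.ceil(len(text) / diameter)
--         result = ""
--         for i in range(rows):
--             row_chars = text[i::rows]
--             result += row_chars
--             steps.append(f"  Row {i+1}: '{row_chars}' → '{result}'")
--
--     details.append(f"Diameter: {diameter}")
--     details.append(f"Text length: {len(text)}")
--     details.append("Ancient Spartan cipher using a cylinder/wrap method")
--
--     return result
-- ===== SOURCE B (Python) =====
-- import math
--
-- def scytale_cipher_crypto(text, key, operation, steps, details):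
--     steps.append(f"=== SCYTALE CIPHER {operation.upper()} ===")
--     steps.append(f"Input text: '{text}'")
--
--     try:
--         diameter = int(key) if key else 3
--     except Exception:
--         diameter = 3
--
--     steps.append(f"Cylinder diameter: {diameter}")
--     steps.append("")
--
--     if operation == 'encrypt':
--         steps.append("Wrapping text around cylinder and reading horizontally:")
--         # explicit cylinder: rows of width `diameter`; reading a column top-down
--         grid = [text[j:j + diameter] for j in range(0, len(text), diameter)] if diameter > 0 else []
--         pieces = []
--         for i in range(diameter):
--             column = ''.join(row[i] for row in grid if i < len(row))
--             pieces.append(column)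
--             steps.append(f"  Column {i+1}: '{column}'")
--         result = ''.join(pieces)
--         steps.append(f"Final result: '{result}'")
--
--     else:
--         steps.append("Reading horizontal stripes and unwrapping from cylinder:")
--         rows = math.ceil(len(text) / diameter)
--         # transposed cylinder: stripes of width `rows`; reading a column top-down
--         grid = [text[j:j + rows] for j in range(0, len(text), rows)] if rows > 0 else []
--         result = ""
--         for i in range(rows):
--             row_chars = ''.join(chunk[i] for chunk in grid if i < len(chunk))
--             result += row_chars
--             steps.append(f"  Row {i+1}: '{row_chars}' → '{result}'")
--
--     details.append(f"Diameter: {diameter}")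
--     details.append(f"Text length: {len(text)}")
--     details.append("Ancient Spartan cipher using a cylinder/wrap method")
--
--     return result
-- ===== Notes on version B (the rewrite author's own statement) =====
-- stated objective: alternative
-- what changed: Instead of reading strided slices text[i::width], B builds the cylinder explicitly as a grid of width-`width` chunks built once, and produces each output column by joining the i-th character of every grid row that has one (encrypt collects columns in a list joined at the end); the log lines and return value are unchanged.
import Mathlib
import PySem

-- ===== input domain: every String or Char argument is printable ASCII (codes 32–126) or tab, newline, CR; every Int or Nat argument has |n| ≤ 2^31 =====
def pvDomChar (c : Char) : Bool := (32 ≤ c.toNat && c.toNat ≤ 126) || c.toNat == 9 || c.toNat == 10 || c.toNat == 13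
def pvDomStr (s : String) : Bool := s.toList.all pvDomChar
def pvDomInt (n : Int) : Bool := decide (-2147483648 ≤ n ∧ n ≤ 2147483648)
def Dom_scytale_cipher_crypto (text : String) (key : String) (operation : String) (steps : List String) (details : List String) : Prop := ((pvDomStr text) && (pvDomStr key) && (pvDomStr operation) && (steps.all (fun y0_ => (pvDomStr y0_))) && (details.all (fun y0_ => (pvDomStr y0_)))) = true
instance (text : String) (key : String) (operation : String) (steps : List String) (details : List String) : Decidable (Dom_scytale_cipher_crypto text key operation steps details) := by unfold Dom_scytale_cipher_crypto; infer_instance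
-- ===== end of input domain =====

-- B replaces A's strided slices text[i::step] by an explicit cylinder grid (list of
-- width-`step` chunks) read column by column (objective: alternative decomposition).
-- Both Pythons mutate `steps`/`details` identically (B reproduces the exact log lines);
-- the equivalence proved here is about the RETURN value only.

-- ===== PORT A =====
-- diameter = int(key) if key else 3, except: diameter = 3   (shared line of both Pythons)
def pvDiameter (key : String) : Int :=
  if key = "" then 3 else (PySem.Int.ofStr? key).getD 3

-- rows = math.ceil(len(text) / diameter)  (shared line of both Pythons; 0 when diameter = 0,
-- where the Python raises ZeroDivisionError — excluded by Pre_)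
def pvRows (n : Nat) (d : Int) : Int :=
  if d = 0 then 0 else -(PySem.Int.floordiv (-(n : Int)) d)

def scytale_cipher_crypto (text : String) (key : String) (operation : String) (steps : List String) (details : List String) : String :=
  let t := text.toList
  let diameter := pvDiameter key
  if operation = "encrypt" then
    -- for i in range(diameter): result += text[i::diameter]
    String.ofList ((PySem.List.pyRange 0 diameter 1).foldl
      (fun acc i => acc ++ (PySem.List.slice? t (some i) none diameter).getD []) [])
  else
    let rows := pvRows t.length diameter
    -- for i in range(rows): result += text[i::rows]
    String.ofList ((PySem.List.pyRange 0 rows 1).foldl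
      (fun acc i => acc ++ (PySem.List.slice? t (some i) none rows).getD []) [])

-- ===== PORT B =====
-- grid = [text[j:j+w] for j in range(0, len(text), w)] if w > 0 else []
def pvGrid (t : List Char) (w : Int) : List (List Char) :=
  if 0 < w then
    (PySem.List.pyRange 0 (t.length : Int) w).map
      (fun j => PySem.List.slice t (some j) (some (j + w)))
  else []

-- ''.join(row[i] for row in grid if i < len(row))
def pvColumn (grid : List (List Char)) (i : Int) : List Char :=
  grid.flatMap (fun row => if i < (row.length : Int) then (PySem.List.pyGet? row i).toList else [])

def scytale_cipher_crypto_alt (text : String) (key : String) (operation : String) (steps : List String) (details : List String) : String :=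
  let t := text.toList
  let diameter := pvDiameter key
  if operation = "encrypt" then
    let grid := pvGrid t diameter
    -- pieces.append(column) per column, then ''.join(pieces)
    String.ofList (((PySem.List.pyRange 0 diameter 1).map (fun i => pvColumn grid i)).flatten)
  else
    let rows := pvRows t.length diameter
    let grid := pvGrid t rows
    -- result += row_chars per stripe
    String.ofList ((PySem.List.pyRange 0 rows 1).foldl
      (fun acc i => acc ++ pvColumn grid i) [])

-- ===== PRECONDITION & SPEC =====
-- Pre_ excludes only the inputs where Python A raises ZeroDivisionError: a non-'encrypt'
-- operation with a key that parses to diameter 0 (B raises there too).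
def Pre_scytale_cipher_crypto (text : String) (key : String) (operation : String) (steps : List String) (details : List String) : Prop :=
  operation = "encrypt" ∨ (if key = "" then (3 : Int) else (PySem.Int.ofStr? key).getD 3) ≠ 0

instance (text : String) (key : String) (operation : String) (steps : List String) (details : List String) : Decidable (Pre_scytale_cipher_crypto text key operation steps details) := by
  unfold Pre_scytale_cipher_crypto; infer_instance

def pvWitness_scytale_cipher_crypto : String × String × String × List String × List String :=
  ("HELLOWORLD", "4", "decrypt", [], [])

def Spec_scytale_cipher_crypto (text : String) (key : String) (operation : String) (steps : List String) (details : List String) (out : String) : Prop := out = scytale_cipher_crypto_alt text key operation steps details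
instance (text : String) (key : String) (operation : String) (steps : List String) (details : List String) (out : String) : Decidable (Spec_scytale_cipher_crypto text key operation steps details out) := by unfold Spec_scytale_cipher_crypto; infer_instance

-- ===== CLAIM (what is proved, stated in full; the proofs are below) =====
def Claim_equal_scytale_cipher_crypto : Prop := ∀ (text : String) (key : String) (operation : String) (steps : List String) (details : List String), Dom_scytale_cipher_crypto text key operation steps details → Pre_scytale_cipher_crypto text key operation steps details → Spec_scytale_cipher_crypto text key operation steps details (scytale_cipher_crypto text key operation steps details)

-- ===== LEMMAS AND PROOFS =====

-- common normal form of one column: the characters t[(i + d*k)] for k = 0,1,…,N-1 that exist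
def pvColIdx (t : List Char) (i d : Int) (N : Nat) : List Char :=
  (List.range N).filterMap (fun (k : Nat) => t[(i + d * (k : Int)).toNat]?)

-- join of a generator over optional characters is a filterMap
lemma pv_flatMap_toList {α β : Type} (l : List α) (f : α → Option β) :
    l.flatMap (fun a => (f a).toList) = l.filterMap f := by
  induction l with
  | nil => rfl
  | cons x xs ih => cases h : f x <;> simp [List.flatMap_cons, List.filterMap_cons, h, ih]

-- ceiling-division inequality: x ≤ d * ⌈x/d⌉ (with the Python count formula)
lemma pv_key (x d : Int) (hd : 0 < d) : x ≤ d * (((x + d - 1) / d).toNat : Int) := by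
  have h1 := Int.ediv_add_emod (x + d - 1) d
  have h2 := Int.emod_nonneg (x + d - 1) (by omega : d ≠ 0)
  have h3 := Int.emod_lt_of_pos (x + d - 1) hd
  by_cases hq : 0 ≤ (x + d - 1) / d
  · rw [Int.toNat_of_nonneg hq]; linarith
  · push_neg at hq
    have h4 : ((x + d - 1) / d).toNat = 0 := Int.toNat_of_nonpos hq.le
    have h5 : d * ((x + d - 1) / d) ≤ d * (-1) :=
      mul_le_mul_of_nonneg_left (by omega) (by omega)
    rw [h4]; push_cast; linarith

-- past the end of the text, extra column indices contribute nothing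
lemma pvColIdx_stable (t : List Char) (i d : Int) (N M : Nat) (hd : 0 < d)
    (hN : (t.length : Int) ≤ i + d * N) (hNM : N ≤ M) :
    pvColIdx t i d M = pvColIdx t i d N := by
  obtain ⟨j, rfl⟩ := Nat.exists_eq_add_of_le hNM
  induction j with
  | zero => rfl
  | succ j ih =>
    have hstep : N + (j + 1) = (N + j) + 1 := by omega
    rw [hstep]
    have hge : d * (N : Int) ≤ d * ((N + j : Nat) : Int) :=
      mul_le_mul_of_nonneg_left (by push_cast; omega) (by omega)
    have hlen : (t.length : Int) ≤ i + d * ((N + j : Nat) : Int) := by linarith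
    have hnone : t[(i + d * ((N + j : Nat) : Int)).toNat]? = none := by
      apply List.getElem?_eq_none
      generalize hP : d * ((N + j : Nat) : Int) = P at hlen hge
      omega
    unfold pvColIdx at ih ⊢
    rw [List.range_succ, List.filterMap_append]
    simp only [List.filterMap_cons, hnone, List.filterMap_nil, List.append_nil]
    exact ih (by omega)

-- A's strided slice text[i::d] in the common normal form
lemma pv_sliceA_eq (t : List Char) (i d : Int) (hi : 0 ≤ i) (hd : 0 < d) :
    (PySem.List.slice? t (some i) none d).getD [] =
      pvColIdx t i d (((t.length : Int) - i + d - 1) / d).toNat := by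
  simp only [PySem.List.slice?, PySem.List.sliceIndices]
  rw [if_neg (by omega : ¬ d = 0)]
  simp only [if_neg (by omega : ¬ d < 0), if_neg (by omega : ¬ i < 0), if_pos hd]
  by_cases hlt : i < (t.length : Int)
  · rw [min_eq_left hlt.le, if_pos hlt]
    unfold pvColIdx
    simp
  · rw [min_eq_right (by omega : (t.length : Int) ≤ i), if_neg (by omega : ¬ (t.length : Int) < (t.length : Int))]
    simp only [List.range_zero, List.filterMap_nil, Option.getD_some]
    symm
    unfold pvColIdx
    rw [List.filterMap_eq_nil_iff]
    intro k _
    apply List.getElem?_eq_none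
    have hk : 0 ≤ d * (k : Int) := mul_nonneg (by omega) (Int.natCast_nonneg k)
    generalize hP : d * (k : Int) = P at hk
    omega

-- B's grid column in the common normal form
lemma pv_columnB_eq (t : List Char) (i d : Int) (hi : 0 ≤ i) (hid : i < d) :
    pvColumn (pvGrid t d) i =
      pvColIdx t i d (if (0 : Int) < (t.length : Int) then (((t.length : Int) - 0 + d - 1) / d).toNat else 0) := by
  have hd : 0 < d := lt_of_le_of_lt hi hid
  unfold pvGrid pvColumn
  rw [if_pos hd, PySem.List.pyRange_of_pos 0 (t.length : Int) hd]
  unfold pvColIdx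
  rw [← pv_flatMap_toList]
  simp only [List.flatMap_map]
  apply List.flatMap_congr
  intro k _
  have hk0 : (0 : Int) ≤ d * (k : Int) := mul_nonneg (by omega) (Int.natCast_nonneg k)
  have hkd : (0 : Int) ≤ d * (k : Int) + d := by omega
  rw [zero_add, PySem.List.slice_toNat t hk0 hkd]
  have htn : (d * (k : Int) + d).toNat = (d * (k : Int)).toNat + d.toNat := by
    generalize hP : d * (k : Int) = P at hk0
    omega
  rw [htn, Nat.add_sub_cancel_left]
  have hiA : (i + d * (k : Int)).toNat = (d * (k : Int)).toNat + i.toNat := by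
    generalize hP : d * (k : Int) = P at hk0
    omega
  rw [hiA]
  set A := (d * (k : Int)).toNat with hA
  have hlen : ((t.drop A).take d.toNat).length = min d.toNat (t.length - A) := by
    simp [List.length_take, List.length_drop]
  by_cases hin : A + i.toNat < t.length
  · have hcond : i < ((((t.drop A).take d.toNat)).length : Int) := by
      rw [hlen]; omega
    rw [if_pos hcond]
    have hidx : ((t.drop A).take d.toNat)[i.toNat]? = t[A + i.toNat]? := by
      rw [List.getElem?_take_of_lt (by omega : i.toNat < d.toNat), List.getElem?_drop]
    have hget : PySem.List.pyGet? ((t.drop A).take d.toNat) i = t[A + i.toNat]? := by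
      simp only [PySem.List.pyGet?, PySem.List.pyIdx?]
      rw [if_pos hi]
      rw [hlen] at hcond ⊢
      rw [if_pos (by omega : i < ((min d.toNat (t.length - A) : Nat) : Int))]
      simpa using hidx
    rw [hget]
  · have hcond : ¬ i < ((((t.drop A).take d.toNat)).length : Int) := by
      rw [hlen]; omega
    rw [if_neg hcond]
    rw [List.getElem?_eq_none (by omega : t.length ≤ A + i.toNat)]
    rfl

-- the two column computations agree (the heart of the equivalence)
lemma pv_col_eq (t : List Char) (i d : Int) (hi : 0 ≤ i) (hid : i < d) :
    (PySem.List.slice? t (some i) none d).getD [] = pvColumn (pvGrid t d) i := by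
  have hd : 0 < d := lt_of_le_of_lt hi hid
  rw [pv_sliceA_eq t i d hi hd, pv_columnB_eq t i d hi hid]
  set NA := (((t.length : Int) - i + d - 1) / d).toNat with hNA
  set NB := (if (0 : Int) < (t.length : Int) then (((t.length : Int) - 0 + d - 1) / d).toNat else 0) with hNB
  have hA : (t.length : Int) ≤ i + d * NA := by
    have := pv_key ((t.length : Int) - i) d hd
    rw [hNA]; linarith
  have hB : (t.length : Int) ≤ i + d * NB := by
    rw [hNB]
    by_cases h0 : (0 : Int) < (t.length : Int)
    · rw [if_pos h0]
      have := pv_key (t.length : Int) d hd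
      have h2 : (((t.length : Int) + d - 1) / d).toNat = (((t.length : Int) - 0 + d - 1) / d).toNat := by ring_nf
      rw [← h2]; linarith
    · rw [if_neg h0]; push_cast; omega
  calc pvColIdx t i d NA = pvColIdx t i d (max NA NB) :=
        (pvColIdx_stable t i d NA (max NA NB) hd hA (le_max_left _ _)).symm
    _ = pvColIdx t i d NB :=
        pvColIdx_stable t i d NB (max NA NB) hd hB (le_max_right _ _)

-- one loop of A equals one pass over B's grid, for any width w (range empty when w ≤ 0)
lemma pv_loop_eq (t : List Char) (w : Int) :
    (PySem.List.pyRange 0 w 1).foldl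
        (fun acc i => acc ++ (PySem.List.slice? t (some i) none w).getD []) [] =
      (PySem.List.pyRange 0 w 1).foldl (fun acc i => acc ++ pvColumn (pvGrid t w) i) [] := by
  apply PySem.List.foldl_congr_mem
  intro acc i hi
  rw [PySem.List.mem_pyRange_one] at hi
  rw [pv_col_eq t i w hi.1 hi.2]

-- ===== VERDICT (by name: the statement is the Claim_ definition above) =====
theorem scytale_cipher_crypto_spec : Claim_equal_scytale_cipher_crypto := by
  intro text key operation steps details _hDom _hPre
  unfold Spec_scytale_cipher_crypto scytale_cipher_crypto scytale_cipher_crypto_alt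
  by_cases hop : operation = "encrypt"
  · simp only [if_pos hop]
    congr 1
    rw [pv_loop_eq, PySem.List.foldl_append_eq_flatMap, List.nil_append, List.flatMap_def]
  · simp only [if_neg hop]
    congr 1
    rw [pv_loop_eq]
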